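-- pv_equiv track=rewrite | github.com/Ismail-deb/sturdy-giggle | python_backend/app.py | _get_status_with_color
-- ===== SOURCE A (Python) =====
-- def _get_status_with_color(status_text):
--     """
--     Map status text to color hex codes for frontend consistency
--     Returns tuple: (status_text, color_hex, severity_level)
--     """
--     status_lower = status_text.lower()
--
--     # Green statuses (optimal/good)
--     if any(word in status_lower for word in ['optimal', 'good', 'normal', 'bright', 'safe']):
--         return (status_text, '#4CAF50', 'optimal')
--
--     # Orange statuses (acceptable/moderate/warning)
--     elif any(word in status_lower for word in ['acceptable', 'moderate', 'elevated', 'dim indoor', 'low light']):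
--         return (status_text, '#FF9800', 'warning')
--
--     # Red statuses (critical/poor/high/danger)
--     # Note: "dark night" is neutral for light readings, not critical
--     elif any(word in status_lower for word in ['critical', 'poor', 'high', 'danger']) and 'dark night' not in status_lower:
--         return (status_text, '#F44336', 'critical')
--
--     # Gray statuses (neutral/informational like "dark night" for light sensors)
--     elif any(word in status_lower for word in ['dark night', 'unknown', 'n/a']):
--         return (status_text, '#9E9E9E', 'unknown')
--
--     # Default (unknown)
--     else:
--         return (status_text, '#9E9E9E', 'unknown')
-- ===== SOURCE B (Python) =====
-- def _get_status_with_color(status_text):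
--     """
--     Severity-rank aggregation: a flat keyword -> tier index, one accumulator
--     pass computing the minimum (most severe-priority) tier among matched
--     keywords, a 'dark night' demotion of the critical tier, then a palette
--     lookup by tier.
--     """
--     s = status_text.lower()
--     TIER = {'optimal': 0, 'good': 0, 'normal': 0, 'bright': 0, 'safe': 0,
--             'acceptable': 1, 'moderate': 1, 'elevated': 1, 'dim indoor': 1,
--             'low light': 1,
--             'critical': 2, 'poor': 2, 'high': 2, 'danger': 2}
--     tier = 3
--     for kw, t in TIER.items():
--         if kw in s and t < tier:
--             tier = t
--     if tier == 2 and 'dark night' in s: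
--         tier = 3
--     PALETTE = [('#4CAF50', 'optimal'), ('#FF9800', 'warning'),
--                ('#F44336', 'critical'), ('#9E9E9E', 'unknown')]
--     color, severity = PALETTE[tier]
--     return (status_text, color, severity)
-- ===== Notes on version B (the rewrite author's own statement) =====
-- stated objective: alternative
-- what changed: Replaced the ordered if/elif group checks by a flat keyword->tier dictionary, a single accumulator pass taking the minimum tier over matched keywords, a 'dark night' demotion of the critical tier, and a palette lookup indexed by tier.
import Mathlib
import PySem

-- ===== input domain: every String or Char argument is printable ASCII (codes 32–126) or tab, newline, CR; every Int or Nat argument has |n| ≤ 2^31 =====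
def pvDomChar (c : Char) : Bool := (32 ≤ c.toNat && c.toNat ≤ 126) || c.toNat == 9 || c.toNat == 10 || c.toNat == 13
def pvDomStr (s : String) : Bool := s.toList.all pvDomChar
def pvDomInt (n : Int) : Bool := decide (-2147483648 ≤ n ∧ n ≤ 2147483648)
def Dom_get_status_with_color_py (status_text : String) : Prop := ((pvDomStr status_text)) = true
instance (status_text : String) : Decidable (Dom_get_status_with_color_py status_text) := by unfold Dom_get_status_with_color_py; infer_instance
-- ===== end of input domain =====

-- B aggregates a minimum severity tier over a flat keyword->tier index and looks the answer
-- up in a palette, instead of A's ordered if/elif group checks (alternative, same cost).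

-- ===== PORT A =====
def get_status_with_color_py (status_text : String) : String × String × String :=
  let status_lower := PySem.Str.lower status_text
  if ["optimal", "good", "normal", "bright", "safe"].any
       (fun w => PySem.Str.isIn w status_lower) then
    (status_text, "#4CAF50", "optimal")
  else if ["acceptable", "moderate", "elevated", "dim indoor", "low light"].any
       (fun w => PySem.Str.isIn w status_lower) then
    (status_text, "#FF9800", "warning")
  else if (["critical", "poor", "high", "danger"].any
       (fun w => PySem.Str.isIn w status_lower))
       && !(PySem.Str.isIn "dark night" status_lower) then
    (status_text, "#F44336", "critical")
  else if ["dark night", "unknown", "n/a"].any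
       (fun w => PySem.Str.isIn w status_lower) then
    (status_text, "#9E9E9E", "unknown")
  else
    (status_text, "#9E9E9E", "unknown")

-- ===== PORT B =====
-- flat keyword -> tier index (Python dict, insertion order)
def pvTier : List (String × Int) :=
  [("optimal", 0), ("good", 0), ("normal", 0), ("bright", 0), ("safe", 0),
   ("acceptable", 1), ("moderate", 1), ("elevated", 1), ("dim indoor", 1),
   ("low light", 1),
   ("critical", 2), ("poor", 2), ("high", 2), ("danger", 2)]

def pvPalette : List (String × String) :=
  [("#4CAF50", "optimal"), ("#FF9800", "warning"),
   ("#F44336", "critical"), ("#9E9E9E", "unknown")]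

def get_status_with_color_py_alt (status_text : String) : String × String × String :=
  let s := PySem.Str.lower status_text
  -- the accumulator loop: tier = 3; for kw, t in TIER.items(): if kw in s and t < tier: tier = t
  let tier := pvTier.foldl
      (fun a p => if PySem.Str.isIn p.1 s && decide (p.2 < a) then p.2 else a) 3
  let tier := if tier == 2 && PySem.Str.isIn "dark night" s then 3 else tier
  match PySem.List.pyGet? pvPalette tier with
  | some cs => (status_text, cs.1, cs.2)
  | none => (status_text, "", "")  -- unreachable: tier is always 0..3

-- ===== PRECONDITION & SPEC =====
def Spec_get_status_with_color_py (status_text : String) (out : String × String × String) : Prop := out = get_status_with_color_py_alt status_text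
instance (status_text : String) (out : String × String × String) : Decidable (Spec_get_status_with_color_py status_text out) := by unfold Spec_get_status_with_color_py; infer_instance

-- ===== CLAIM (what is proved, stated in full; the proofs are below) =====
def Claim_equal_get_status_with_color_py : Prop := ∀ (status_text : String), Dom_get_status_with_color_py status_text → Spec_get_status_with_color_py status_text (get_status_with_color_py status_text)

-- ===== LEMMAS AND PROOFS =====

-- B's accumulator loop, restricted to a block of keywords all carrying the same tier c,
-- lowers the accumulator to min acc c exactly when some keyword of the block matches.
lemma fold_tier_block (s : String) (c : Int) (l : List (String × Int))
    (h : ∀ p ∈ l, p.2 = c) (acc : Int) :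
    l.foldl (fun a p => if PySem.Str.isIn p.1 s && decide (p.2 < a) then p.2 else a) acc =
    if l.any (fun p => PySem.Str.isIn p.1 s) then min acc c else acc := by
  induction l generalizing acc with
  | nil => simp
  | cons hd tl ih =>
    obtain ⟨k, t⟩ := hd
    have hc : t = c := h (k, t) (by simp)
    have htl : ∀ p ∈ tl, p.2 = c := fun p hp => h p (by simp [hp])
    subst hc
    simp only [List.foldl_cons, List.any_cons]
    rw [ih htl]
    by_cases hP : PySem.Str.isIn k s = true <;>
      by_cases hlt : t < acc <;>
      by_cases hA : (tl.any (fun p => PySem.Str.isIn p.1 s)) = true <;>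
      simp only [hP, hlt, hA, decide_true, decide_false, Bool.and_true, Bool.and_false,
        Bool.or_true, Bool.or_false, if_true, if_false] <;>
      first
        | rfl
        | (simp only [Bool.eq_false_iff] at hP hA <;> simp [hP, hA, hlt] <;> omega)
        | (simp [hP, hA, hlt] <;> omega)
        | omega

-- ===== VERDICT =====
theorem get_status_with_color_py_spec : Claim_equal_get_status_with_color_py := by
  intro s _
  unfold Spec_get_status_with_color_py get_status_with_color_py get_status_with_color_py_alt
  simp only []
  set l := PySem.Str.lower s with hl
  rw [show pvTier =
      [("optimal", (0:Int)), ("good", 0), ("normal", 0), ("bright", 0), ("safe", 0)] ++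
      ([("acceptable", 1), ("moderate", 1), ("elevated", 1), ("dim indoor", 1), ("low light", 1)] ++
       [("critical", 2), ("poor", 2), ("high", 2), ("danger", 2)]) from rfl,
      List.foldl_append, List.foldl_append,
      fold_tier_block l 0 [("optimal", (0:Int)), ("good", 0), ("normal", 0), ("bright", 0), ("safe", 0)] (by decide),
      fold_tier_block l 1 [("acceptable", (1:Int)), ("moderate", 1), ("elevated", 1), ("dim indoor", 1), ("low light", 1)] (by decide),
      fold_tier_block l 2 [("critical", (2:Int)), ("poor", 2), ("high", 2), ("danger", 2)] (by decide)]
  cases hG : ["optimal", "good", "normal", "bright", "safe"].any (fun w => PySem.Str.isIn w l) <;>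
  cases hO : ["acceptable", "moderate", "elevated", "dim indoor", "low light"].any (fun w => PySem.Str.isIn w l) <;>
  cases hR : ["critical", "poor", "high", "danger"].any (fun w => PySem.Str.isIn w l) <;>
  cases hD : PySem.Str.isIn "dark night" l <;>
    simp_all [pvPalette, PySem.List.pyGet?, PySem.List.pyIdx?]
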